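-- pv_equiv track=rewrite | github.com/ruthhhs/UnivCodeJourney | semester_1/praktikum/daspro_7/e2.py | maxNbHelp
-- ===== SOURCE A (Python) =====
-- def firstElmt(L):
--     return L[0]
--
-- def tail(L):
--     return L[1:]
--
-- def isEmpty(L):
--     return L == []
--
-- def maxNbHelp (L, max, count) :
--     if isEmpty(L) :
--         return [max, count]
--     else :
--         if firstElmt(L) > max :
--             return maxNbHelp(tail(L), firstElmt(L), 1)
--         elif firstElmt(L) == max :
--             return maxNbHelp(tail(L), max, count +1)
--         else :
--             return maxNbHelp(tail(L), max, count)
-- ===== SOURCE B (Python) =====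
-- def maxNbHelp(L, max, count):
--     for x in L:
--         if x > max:
--             max, count = x, 1
--         elif x == max:
--             count += 1
--     return [max, count]
-- ===== Notes on version B (the rewrite author's own statement) =====
-- stated objective: idiomatic
-- what changed: Replaces list-slicing tail recursion with a single iterative pass updating the (max, count) accumulators in place.
import Mathlib
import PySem

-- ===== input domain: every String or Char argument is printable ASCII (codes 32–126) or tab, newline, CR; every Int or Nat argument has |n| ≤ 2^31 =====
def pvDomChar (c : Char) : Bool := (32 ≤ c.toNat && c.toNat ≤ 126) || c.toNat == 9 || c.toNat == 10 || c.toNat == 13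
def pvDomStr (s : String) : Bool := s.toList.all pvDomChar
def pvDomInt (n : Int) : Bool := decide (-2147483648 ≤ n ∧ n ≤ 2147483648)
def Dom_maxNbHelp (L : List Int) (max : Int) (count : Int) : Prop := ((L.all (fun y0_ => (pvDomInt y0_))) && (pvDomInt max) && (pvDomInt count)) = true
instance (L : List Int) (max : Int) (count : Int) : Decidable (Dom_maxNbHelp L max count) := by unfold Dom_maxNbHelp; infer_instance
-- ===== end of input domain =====

-- B replaces A's list-slicing tail recursion with a single iterative pass (idiomatic one-pass loop).

-- ===== PORT A =====
-- helpers of A: firstElmt (L[0], partial in Python — only called after the isEmpty guard),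
-- tail (L[1:]), isEmpty (L == [])
def pvFirstElmt (L : List Int) : Int := L.headD 0  -- only used when L ≠ [] (guarded in maxNbHelp, as in A)
def pvTail (L : List Int) : List Int := PySem.List.slice L (some 1) none
def pvIsEmpty (L : List Int) : Bool := L == []

def maxNbHelp (L : List Int) (max : Int) (count : Int) : List Int :=
  if pvIsEmpty L then [max, count]
  else
    if pvFirstElmt L > max then maxNbHelp (pvTail L) (pvFirstElmt L) 1
    else if pvFirstElmt L == max then maxNbHelp (pvTail L) max (count + 1)
    else maxNbHelp (pvTail L) max count
termination_by L.length
decreasing_by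
  all_goals
    simp [pvIsEmpty, pvTail, PySem.List.slice_from_one] at *
    cases L with
    | nil => simp_all
    | cons a t => simp

-- ===== PORT B =====
def maxNbHelp_alt (L : List Int) (max : Int) (count : Int) : List Int :=
  let p := L.foldl
    (fun (acc : Int × Int) x =>
      if x > acc.1 then (x, 1)
      else if x == acc.1 then (acc.1, acc.2 + 1)
      else acc) (max, count)
  [p.1, p.2]

-- ===== PRECONDITION & SPEC =====
def Spec_maxNbHelp (L : List Int) (max : Int) (count : Int) (out : List Int) : Prop := out = maxNbHelp_alt L max count
instance (L : List Int) (max : Int) (count : Int) (out : List Int) : Decidable (Spec_maxNbHelp L max count out) := by unfold Spec_maxNbHelp; infer_instance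

-- ===== CLAIM (what is proved, stated in full; the proofs are below) =====
def Claim_equal_maxNbHelp : Prop := ∀ (L : List Int) (max : Int) (count : Int), Dom_maxNbHelp L max count → Spec_maxNbHelp L max count (maxNbHelp L max count)

-- ===== LEMMAS AND PROOFS =====
theorem maxNbHelp_eq_alt (L : List Int) (max count : Int) :
    maxNbHelp L max count = maxNbHelp_alt L max count := by
  induction L generalizing max count with
  | nil => simp [maxNbHelp, maxNbHelp_alt, pvIsEmpty]
  | cons a t ih =>
    rw [maxNbHelp]
    simp only [pvIsEmpty, pvFirstElmt, pvTail, PySem.List.slice_from_one]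
    simp only [List.cons_ne_nil, beq_iff_eq, if_false, List.headD_cons]
    rw [maxNbHelp_alt]
    simp only [List.foldl_cons]
    split_ifs with h1 h2 <;> simp_all [maxNbHelp_alt, beq_iff_eq]

-- ===== VERDICT (by name: the statement is the Claim_ definition above) =====
theorem maxNbHelp_spec : Claim_equal_maxNbHelp := by
  intro L max count _
  exact maxNbHelp_eq_alt L max count
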